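-- pv_equiv track=rewrite | github.com/Akashdeep1000/NarrativetoNumbers | app/services/llm_tlx.py | _offline_score
-- ===== SOURCE A (Python) =====
-- from typing import Optional, Tuple, Dict
--
-- _POS_SUCCESS = [
--     "very successful","extremely successful","highly successful","did great",
--     "went very well","flawless","perfect","nailed it","excellent"
-- ]
--
-- _NEG_SUCCESS = [
--     "not successful","unsuccessful","failed","went poorly","did badly","struggled a lot"
-- ]
--
-- def _offline_score(dimension: str, text: str) -> Tuple[int, str]:
--     """
--     Offline heuristic fallback for 1..7 scoring with dimension-aware tweaks.
--     """
--     txt = (text or "").lower()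
--     score = 4  # neutral start
--
--     if dimension == "Performance":
--         if any(ph in txt for ph in _POS_SUCCESS): score = max(score, 6)
--         if any(ph in txt for ph in _NEG_SUCCESS): score = min(score, 2)
--         # generic cues
--         if "many mistakes" in txt or "lot of mistakes" in txt: score = min(score, 3)
--         if "few mistakes" in txt or "minimal mistakes" in txt: score = max(score, 5)
--         return score, "offline heuristic"
--
--
--     inc = ["overwhelm","intense","very high","extreme","frustrat","stress","rushed","panic","pressure","hard"]
--     dec = ["easy","simple","smooth","relax","low","little","calm","manageable"]
--     for w in inc:
--         if w in txt: score = min(7, score + 2)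
--     for w in dec:
--         if w in txt: score = max(1, score - 2)
--     return score, "offline heuristic"
-- ===== SOURCE B (Python) =====
-- _POS_SUCCESS = [
--     "very successful","extremely successful","highly successful","did great",
--     "went very well","flawless","perfect","nailed it","excellent"
-- ]
--
-- _NEG_SUCCESS = [
--     "not successful","unsuccessful","failed","went poorly","did badly","struggled a lot"
-- ]
--
-- _INC = ["overwhelm","intense","very high","extreme","frustrat","stress","rushed","panic","pressure","hard"]
-- _DEC = ["easy","simple","smooth","relax","low","little","calm","manageable"]
--
-- def _offline_score(dimension, text):
--     txt = (text or "").lower()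
--
--     def has(ph):
--         return ph in txt
--
--     if dimension == "Performance":
--         # negative cues dominate (min with 2 always wins), then positive, else neutral
--         s = 2 if any(map(has, _NEG_SUCCESS)) else 6 if any(map(has, _POS_SUCCESS)) else 4
--         if has("many mistakes") or has("lot of mistakes"):
--             s = min(s, 3)
--         if has("few mistakes") or has("minimal mistakes"):
--             s = max(s, 5)
--         return s, "offline heuristic"
--
--     inc_count = sum(map(has, _INC))
--     dec_count = sum(map(has, _DEC))
--     return max(1, min(7, 4 + 2 * inc_count) - 2 * dec_count), "offline heuristic"
-- ===== Notes on version B (the rewrite author's own statement) =====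
-- stated objective: simpler
-- what changed: The neutral branch's two per-match clamping loops become counting matches plus a two-stage closed form min(7,4+2*inc)-then-max(1,.-2*dec), and the Performance branch's sequential max/min guards become a direct case selection (neg->2 else pos->6 else 4) followed by the two mistakes adjustments.
import Mathlib
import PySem

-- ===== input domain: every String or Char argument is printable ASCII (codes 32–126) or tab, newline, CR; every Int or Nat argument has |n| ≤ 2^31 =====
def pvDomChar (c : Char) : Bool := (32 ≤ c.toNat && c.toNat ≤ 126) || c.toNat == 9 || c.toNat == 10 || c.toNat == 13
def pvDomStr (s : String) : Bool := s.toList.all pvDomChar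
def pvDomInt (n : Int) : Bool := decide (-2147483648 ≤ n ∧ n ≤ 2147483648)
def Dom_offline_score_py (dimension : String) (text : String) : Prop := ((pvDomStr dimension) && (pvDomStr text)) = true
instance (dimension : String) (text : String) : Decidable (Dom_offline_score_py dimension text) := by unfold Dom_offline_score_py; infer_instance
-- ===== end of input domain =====

-- B replaces the neutral branch's per-match clamping loops by counting matches and a two-stage closed
-- form, and the Performance branch's sequential max/min guards by a direct case selection; objective: simpler.

-- ===== PORT A =====
def pvPosSuccess : List String := ["very successful","extremely successful","highly successful","did great",
  "went very well","flawless","perfect","nailed it","excellent"]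
def pvNegSuccess : List String := ["not successful","unsuccessful","failed","went poorly","did badly","struggled a lot"]
def pvInc : List String := ["overwhelm","intense","very high","extreme","frustrat","stress","rushed","panic","pressure","hard"]
def pvDec : List String := ["easy","simple","smooth","relax","low","little","calm","manageable"]

def offline_score_py (dimension : String) (text : String) : Int × String :=
  let txt := PySem.Str.lower text
  let score : Int := 4
  if dimension == "Performance" then
    let score := if pvPosSuccess.any (fun ph => PySem.Str.isIn ph txt) then max score 6 else score
    let score := if pvNegSuccess.any (fun ph => PySem.Str.isIn ph txt) then min score 2 else score
    let score := if PySem.Str.isIn "many mistakes" txt || PySem.Str.isIn "lot of mistakes" txt then min score 3 else score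
    let score := if PySem.Str.isIn "few mistakes" txt || PySem.Str.isIn "minimal mistakes" txt then max score 5 else score
    (score, "offline heuristic")
  else
    let score := pvInc.foldl (fun s w => if PySem.Str.isIn w txt then min 7 (s + 2) else s) score
    let score := pvDec.foldl (fun s w => if PySem.Str.isIn w txt then max 1 (s - 2) else s) score
    (score, "offline heuristic")

-- ===== PORT B =====
def offline_score_py_alt (dimension : String) (text : String) : Int × String :=
  let txt := PySem.Str.lower text
  let has : String → Bool := fun ph => PySem.Str.isIn ph txt
  if dimension == "Performance" then
    -- negative cues dominate (min with 2 always wins), then positive, else neutral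
    let s : Int := if pvNegSuccess.any has then 2 else if pvPosSuccess.any has then 6 else 4
    let s := if has "many mistakes" || has "lot of mistakes" then min s 3 else s
    let s := if has "few mistakes" || has "minimal mistakes" then max s 5 else s
    (s, "offline heuristic")
  else
    let incCount : Int := pvInc.countP has
    let decCount : Int := pvDec.countP has
    (max 1 (min 7 (4 + 2 * incCount) - 2 * decCount), "offline heuristic")

-- ===== PRECONDITION & SPEC =====
def Spec_offline_score_py (dimension : String) (text : String) (out : Int × String) : Prop := out = offline_score_py_alt dimension text
instance (dimension : String) (text : String) (out : Int × String) : Decidable (Spec_offline_score_py dimension text out) := by unfold Spec_offline_score_py; infer_instance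

-- ===== CLAIM (what is proved, stated in full; the proofs are below) =====
def Claim_equal_offline_score_py : Prop := ∀ (dimension : String) (text : String), Dom_offline_score_py dimension text → Spec_offline_score_py dimension text (offline_score_py dimension text)

-- ===== LEMMAS AND PROOFS =====

theorem incFold_eq (P : String → Bool) (ws : List String) (x : Int) (hx : x ≤ 7) :
    ws.foldl (fun s w => if P w then min 7 (s + 2) else s) x
      = min 7 (x + 2 * ((ws.countP P : Nat) : Int)) := by
  induction ws generalizing x with
  | nil => simp; omega
  | cons w ws ih =>
    by_cases h : P w
    · simp only [List.foldl_cons, List.countP_cons, h, if_pos]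
      rw [ih (min 7 (x + 2)) (by omega)]
      push_cast
      omega
    · simp only [List.foldl_cons, List.countP_cons, h]
      simp only [Bool.false_eq_true, if_false, Nat.add_zero]
      exact ih x hx

theorem decFold_eq (P : String → Bool) (ws : List String) (x : Int) (hx : 1 ≤ x) :
    ws.foldl (fun s w => if P w then max 1 (s - 2) else s) x
      = max 1 (x - 2 * ((ws.countP P : Nat) : Int)) := by
  induction ws generalizing x with
  | nil => simp; omega
  | cons w ws ih =>
    by_cases h : P w
    · simp only [List.foldl_cons, List.countP_cons, h, if_pos]
      rw [ih (max 1 (x - 2)) (by omega)]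
      push_cast
      omega
    · simp only [List.foldl_cons, List.countP_cons, h]
      simp only [Bool.false_eq_true, if_false, Nat.add_zero]
      exact ih x hx

-- ===== VERDICT (by name: the statement is the Claim_ definition above) =====
theorem offline_score_py_spec : Claim_equal_offline_score_py := by
  intro dimension text _
  unfold Spec_offline_score_py offline_score_py offline_score_py_alt
  by_cases hd : dimension == "Performance"
  · simp only [hd, if_pos]
    split_ifs <;> simp <;> omega
  · simp only [hd, Bool.false_eq_true, if_false]
    rw [incFold_eq _ _ _ (by norm_num)]
    rw [decFold_eq _ _ _ (by omega)]
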